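-- pv_equiv track=rewrite | github.com/takaramono77420/recursion_learning | Intermediate/List/hasSameType.py | hasSameType
-- ===== SOURCE A (Python) =====
-- def hasSameType(user1,user2):
--     # 関数を完成させてください
--     if len(user1) != len(user2):return False
--
--     hashMap = {}
--
--     for index, user1Type in enumerate(user1):
--         user2Type = user2[index]
--
--         if user1Type not in hashMap and user2Type not in hashMap.values():
--             hashMap[user1Type] = user2Type
--
--         if hashMap.get(user1Type) != user2Type:
--             return False
--
--     return True
-- ===== SOURCE B (Python) =====
-- def hasSameType(user1, user2):
--     if len(user1) != len(user2):
--         return False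
--     n = len(user1)
--     return all((user1[i] == user1[j]) == (user2[i] == user2[j])
--                for i in range(n) for j in range(n))
-- ===== Notes on version B (the rewrite author's own statement) =====
-- stated objective: simpler
-- what changed: B replaces A's incremental bijective hash-map construction with a direct pairwise check: the lists are isomorphic iff they have equal length and for every pair of positions (i,j) the elements agree at i,j in user1 exactly when they agree in user2.
import Mathlib
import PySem

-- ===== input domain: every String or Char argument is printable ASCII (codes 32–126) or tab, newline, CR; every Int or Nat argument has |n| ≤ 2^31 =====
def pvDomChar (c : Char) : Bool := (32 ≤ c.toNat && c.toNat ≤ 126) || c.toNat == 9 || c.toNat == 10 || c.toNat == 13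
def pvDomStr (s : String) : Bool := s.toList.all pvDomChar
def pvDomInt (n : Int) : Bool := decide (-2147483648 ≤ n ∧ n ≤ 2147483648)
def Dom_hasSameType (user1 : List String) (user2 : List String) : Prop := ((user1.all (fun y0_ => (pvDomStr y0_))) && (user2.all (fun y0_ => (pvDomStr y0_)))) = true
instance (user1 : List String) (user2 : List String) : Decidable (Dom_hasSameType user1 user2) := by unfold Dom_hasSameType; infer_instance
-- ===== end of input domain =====

-- B replaces A's incremental bijective hash-map construction with a direct pairwise
-- equality-pattern check of the two lists (simpler; same worst-case cost).


-- ===== PORT A =====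
-- the for-loop over enumerate(user1) with user2[index]: after the length guard the
-- two lists are walked in lockstep; early 'return False' is the 'false' branch.
def hasSameTypeLoop : List String → List String → PySem.Dict String String → Bool
  | x :: xs, y :: ys, m =>
    let m' := if (!(m.contains x)) && (!(m.values.contains y)) then m.insert x y else m
    if m'.get? x ≠ some y then false else hasSameTypeLoop xs ys m'
  | _, _, _ => true

def hasSameType (user1 : List String) (user2 : List String) : Bool :=
  if user1.length ≠ user2.length then false
  else hasSameTypeLoop user1 user2 PySem.Dict.empty

-- ===== PORT B =====
def hasSameType_alt (user1 : List String) (user2 : List String) : Bool :=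
  if user1.length ≠ user2.length then false
  else
    let n : Int := user1.length
    (PySem.List.pyRange 0 n 1).all fun i =>
      (PySem.List.pyRange 0 n 1).all fun j =>
        ((PySem.List.pyGet? user1 i == PySem.List.pyGet? user1 j)
          == (PySem.List.pyGet? user2 i == PySem.List.pyGet? user2 j))

-- ===== PRECONDITION & SPEC =====
def Spec_hasSameType (user1 : List String) (user2 : List String) (out : Bool) : Prop := out = hasSameType_alt user1 user2
instance (user1 : List String) (user2 : List String) (out : Bool) : Decidable (Spec_hasSameType user1 user2 out) := by unfold Spec_hasSameType; infer_instance

-- ===== CLAIM (what is proved, stated in full; the proofs are below) =====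
def Claim_equal_hasSameType : Prop := ∀ (user1 : List String) (user2 : List String), Dom_hasSameType user1 user2 → Spec_hasSameType user1 user2 (hasSameType user1 user2)

-- ===== LEMMAS AND PROOFS =====

-- Both programs decide this relation: positions agree in user1 iff they agree in user2.
def IsoAt (u : List String) (v : List String) : Prop :=
  ∀ i j : Nat, i < u.length → j < u.length → (u[i]? = u[j]? ↔ v[i]? = v[j]?)

theorem beq_beq_iff_iff {α : Type} [BEq α] [LawfulBEq α] (a b c d : α) :
    (((a == b) == (c == d)) = true) ↔ (a = b ↔ c = d) := by
  cases h1 : a == b <;> cases h2 : c == d <;>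
    simp_all

theorem isoAt_append {p q : List String} (x y : String) (hpq : p.length = q.length)
    (h : IsoAt p q) (hxy : ∀ j (_ : j < p.length), p[j]? = some x ↔ q[j]? = some y) :
    IsoAt (p ++ [x]) (q ++ [y]) := by
  intro i j hi hj
  simp only [List.length_append, List.length_singleton] at hi hj
  rcases Nat.lt_succ_iff_lt_or_eq.mp hi with hi' | hi' <;>
    rcases Nat.lt_succ_iff_lt_or_eq.mp hj with hj' | hj'
  · have hpi : (p ++ [x])[i]? = p[i]? := List.getElem?_append_left hi'
    have hpj : (p ++ [x])[j]? = p[j]? := List.getElem?_append_left hj'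
    have hqi : (q ++ [y])[i]? = q[i]? := List.getElem?_append_left (by omega)
    have hqj : (q ++ [y])[j]? = q[j]? := List.getElem?_append_left (by omega)
    rw [hpi, hpj, hqi, hqj]
    exact h i j hi' hj'
  · subst hj'
    have hx : (p ++ [x])[p.length]? = some x := by simp
    have hy : (q ++ [y])[p.length]? = some y := by rw [hpq]; simp
    have hpi : (p ++ [x])[i]? = p[i]? := List.getElem?_append_left hi'
    have hqi : (q ++ [y])[i]? = q[i]? := List.getElem?_append_left (by omega)
    rw [hpi, hqi, hx, hy]
    exact hxy i hi'
  · subst hi'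
    have hx : (p ++ [x])[p.length]? = some x := by simp
    have hy : (q ++ [y])[p.length]? = some y := by rw [hpq]; simp
    have hpj : (p ++ [x])[j]? = p[j]? := List.getElem?_append_left hj'
    have hqj : (q ++ [y])[j]? = q[j]? := List.getElem?_append_left (by omega)
    rw [hpj, hqj, hx, hy]
    constructor
    · intro hh; exact ((hxy j hj').mp hh.symm).symm
    · intro hh; exact ((hxy j hj').mpr hh.symm).symm
  · subst hi'; subst hj'; simp

theorem loop_iff : ∀ (r1 r2 p q : List String) (m : PySem.Dict String String),
    p.length = q.length → r1.length = r2.length →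
    (∀ z, m.get? z = (PySem.List.index? p z).bind (fun i => q[i]?)) →
    (∀ y', y' ∈ m.values ↔ y' ∈ q) →
    IsoAt p q →
    (hasSameTypeLoop r1 r2 m = true ↔ IsoAt (p ++ r1) (q ++ r2)) := by
  intro r1
  induction r1 with
  | nil =>
    intro r2 p q m hpq hr hm hv hIso
    have : r2 = [] := List.eq_nil_of_length_eq_zero (by simpa using hr.symm)
    subst this
    simpa [hasSameTypeLoop] using hIso
  | cons x xs ih =>
    intro r2 p q m hpq hr hm hv hIso
    cases r2 with
    | nil => simp at hr
    | cons y ys =>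
      have hrl : xs.length = ys.length := by simpa using hr
      -- shared: the extended-prefix lookup for keys other than x
      have hmz : ∀ z, z ≠ x →
          ((PySem.List.index? (p ++ [x]) z).bind (fun i => (q ++ [y])[i]?)) =
          ((PySem.List.index? p z).bind (fun i => q[i]?)) := by
        intro z hz
        by_cases hzp : z ∈ p
        · rw [PySem.List.index?_append_of_mem [x] hzp]
          cases hidx : PySem.List.index? p z with
          | none => rfl
          | some i =>
            obtain ⟨hi, -, -⟩ := PySem.List.getElem_of_index?_eq_some hidx
            simp [List.getElem?_append_left (show i < q.length by omega)]
        · rw [(PySem.List.index?_eq_none_iff _ _).mpr hzp,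
            (PySem.List.index?_eq_none_iff _ _).mpr (by simp [hzp, hz])]
          rfl
      by_cases hx : x ∈ p
      · -- x already seen in user1: no insertion happens
        obtain ⟨i, hidx⟩ :=
          Option.isSome_iff_exists.mp ((PySem.List.index?_isSome_iff _ _).mpr hx)
        obtain ⟨hi, hpi, hmin⟩ := PySem.List.getElem_of_index?_eq_some hidx
        have hiq : i < q.length := by omega
        have hgx : m.get? x = some (q[i]'hiq) := by
          rw [hm x, hidx]; simp [List.getElem?_eq_getElem hiq]
        have hcx : m.contains x = true := by
          rw [PySem.Dict.contains_eq_isSome_get?, hgx]; rfl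
        have hux : (p ++ x :: xs)[p.length]? = some x := by
          rw [List.getElem?_append_right (Nat.le_refl _)]; simp
        have huy : (q ++ y :: ys)[p.length]? = some y := by
          rw [hpq, List.getElem?_append_right (Nat.le_refl _)]; simp
        have hui : (p ++ x :: xs)[i]? = some x := by
          rw [List.getElem?_append_left hi, List.getElem?_eq_getElem hi, hpi]
        have hvi : (q ++ y :: ys)[i]? = some (q[i]'hiq) := by
          rw [List.getElem?_append_left hiq, List.getElem?_eq_getElem hiq]
        by_cases hvy : q[i]'hiq = y
        · -- consistent: recurse
          have step := ih ys (p ++ [x]) (q ++ [y]) m (by simp [hpq]) hrl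
            (by
              intro z
              by_cases hz : z = x
              · subst hz
                rw [hm _, hidx, PySem.List.index?_append_of_mem [_] hx, hidx]
                simp [List.getElem?_append_left hiq]
              · rw [hmz z hz, hm z])
            (by
              intro y'
              constructor
              · intro hmem; exact List.mem_append_left _ ((hv y').mp hmem)
              · intro hmem
                rcases List.mem_append.mp hmem with h' | h'
                · exact (hv y').mpr h'
                · have h'' : y' = y := by simpa using h'
                  have : (x, y') ∈ m.items := by
                    apply PySem.Dict.mem_items_of_get?_eq_some
                    rw [hgx, hvy, h'']
                  simp only [PySem.Dict.values]
                  exact List.mem_map.mpr ⟨(x, y'), this, rfl⟩)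
            (isoAt_append x y hpq hIso (by
              intro j hj
              have hjq : j < q.length := by omega
              rw [List.getElem?_eq_getElem hj, List.getElem?_eq_getElem hjq]
              constructor
              · intro hh
                have hpj : p[j]'hj = x := by simpa using hh
                have h2 := (hIso j i hj hi).mp (by
                  rw [List.getElem?_eq_getElem hj, List.getElem?_eq_getElem hi, hpj, hpi])
                rw [List.getElem?_eq_getElem hjq, List.getElem?_eq_getElem hiq] at h2
                have h3 : q[j]'hjq = q[i]'hiq := by simpa using h2
                rw [h3, hvy]
              · intro hh
                have hqj : q[j]'hjq = y := by simpa using hh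
                have h2 := (hIso j i hj hi).mpr (by
                  rw [List.getElem?_eq_getElem hjq, List.getElem?_eq_getElem hiq, hqj, hvy])
                rw [List.getElem?_eq_getElem hj, List.getElem?_eq_getElem hi] at h2
                have h3 : p[j]'hj = p[i]'hi := by simpa using h2
                rw [h3, hpi]))
          have hassoc1 : p ++ [x] ++ xs = p ++ x :: xs := by simp
          have hassoc2 : q ++ [y] ++ ys = q ++ y :: ys := by simp
          rw [hassoc1, hassoc2] at step
          simpa [hasSameTypeLoop, hcx, hgx, hvy] using step
        · -- inconsistent: A fails, and the relation fails at positions i and p.length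
          have hfail : hasSameTypeLoop (x :: xs) (y :: ys) m = false := by
            simp [hasSameTypeLoop, hcx, hgx, hvy]
          rw [hfail]
          simp only [Bool.false_eq_true, false_iff]
          intro HIso
          have hb1 : i < (p ++ x :: xs).length := by simp only [List.length_append, List.length_cons]; omega
          have hb2 : p.length < (p ++ x :: xs).length := by simp only [List.length_append, List.length_cons]; omega
          have h2 := (HIso i p.length hb1 hb2).mp (by rw [hui, hux])
          rw [hvi, huy] at h2
          exact hvy (Option.some.inj h2)
      · -- x unseen in user1
        have hgx : m.get? x = none := by
          rw [hm x, (PySem.List.index?_eq_none_iff _ _).mpr hx]; rfl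
        have hcx : m.contains x = false := by
          rw [PySem.Dict.contains_eq_isSome_get?, hgx]; rfl
        by_cases hy : y ∈ q
        · -- y already used: A fails, and the relation fails
          have hymem : y ∈ m.values := (hv y).mpr hy
          have hfail : hasSameTypeLoop (x :: xs) (y :: ys) m = false := by
            simp [hasSameTypeLoop, hcx, hymem, hgx]
          rw [hfail]
          simp only [Bool.false_eq_true, false_iff]
          intro HIso
          obtain ⟨i, hiq, hqi⟩ := List.getElem_of_mem hy
          have hip : i < p.length := by omega
          have hb1 : i < (p ++ x :: xs).length := by simp only [List.length_append, List.length_cons]; omega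
          have hb2 : p.length < (p ++ x :: xs).length := by simp only [List.length_append, List.length_cons]; omega
          have h2 := (HIso i p.length hb1 hb2).mpr (by
            rw [List.getElem?_append_left hiq, List.getElem?_eq_getElem hiq, hqi,
              hpq, List.getElem?_append_right (Nat.le_refl _)]
            simp)
          rw [List.getElem?_append_left hip,
            List.getElem?_append_right (Nat.le_refl _)] at h2
          simp only [Nat.sub_self] at h2
          have hx' : p[i]? = some x := by simpa using h2
          have h3 : p[i]'hip = x := by simpa [List.getElem?_eq_getElem hip] using hx'
          exact hx (h3 ▸ List.getElem_mem hip)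
        · -- both fresh: insert and recurse
          have hynot : y ∉ m.values := fun hmem => hy ((hv y).mp hmem)
          have hval : (m.insert x y).values = m.values ++ [y] := by
            simp [PySem.Dict.values, PySem.Dict.items_insert_of_not_contains m y hcx]
          have step := ih ys (p ++ [x]) (q ++ [y]) (m.insert x y) (by simp [hpq]) hrl
            (by
              intro z
              by_cases hz : z = x
              · subst hz
                rw [PySem.Dict.get?_insert_self,
                  PySem.List.index?_append_singleton_self p _ hx]
                have h0 : (q ++ [y])[p.length]? = some y := by rw [hpq]; simp
                simp [h0]
              · rw [PySem.Dict.get?_insert_of_ne m y hz, hmz z hz, hm z])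
            (by
              intro y'
              rw [hval]
              simp only [List.mem_append, List.mem_singleton]
              exact or_congr_left (hv y'))
            (isoAt_append x y hpq hIso (by
              intro j hj
              have hjq : j < q.length := by omega
              rw [List.getElem?_eq_getElem hj, List.getElem?_eq_getElem hjq]
              constructor
              · intro hh
                exact absurd ((Option.some.inj hh) ▸ List.getElem_mem hj) hx
              · intro hh
                exact absurd ((Option.some.inj hh) ▸ List.getElem_mem hjq) hy))
          have hassoc1 : p ++ [x] ++ xs = p ++ x :: xs := by simp
          have hassoc2 : q ++ [y] ++ ys = q ++ y :: ys := by simp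
          rw [hassoc1, hassoc2] at step
          simpa [hasSameTypeLoop, hcx, hynot, PySem.Dict.get?_insert_self] using step

theorem alt_iff (u1 u2 : List String) (h : u1.length = u2.length) :
    hasSameType_alt u1 u2 = true ↔ IsoAt u1 u2 := by
  unfold hasSameType_alt IsoAt
  rw [if_neg (by simp [h])]
  simp only [PySem.List.pyRange_zero_nat, List.all_map, List.all_eq_true, List.mem_range,
    PySem.List.pyGet?_natCast, Function.comp, beq_beq_iff_iff]
  exact ⟨fun H i j hi hj => H i hi j hj, fun H i hi j hj => H i j hi hj⟩

-- ===== VERDICT (by name: the statement is the Claim_ definition above) =====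
theorem hasSameType_spec : Claim_equal_hasSameType := by
  intro u1 u2 _
  unfold Spec_hasSameType
  by_cases h : u1.length = u2.length
  · have hA : hasSameType u1 u2 = hasSameTypeLoop u1 u2 PySem.Dict.empty := by
      simp [hasSameType, h]
    have h0 := loop_iff u1 u2 [] [] PySem.Dict.empty rfl h
      (by intro z; simp [PySem.List.index?_eq_idxOf?])
      (by intro y'; simp [PySem.Dict.values, PySem.Dict.empty])
      (by intro i j hi hj; simp at hi)
    rw [Bool.eq_iff_iff, hA, h0, alt_iff u1 u2 h]
    simp
  · simp [hasSameType, hasSameType_alt, h]
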